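-- pv_equiv track=rewrite | github.com/Rakeshrallabandi/leetcode_problems | 4080-smallest-missing-multiple-of-k/smallest-missing-multiple-of-k.py | missingMultiple
-- ===== SOURCE A (Python) =====
-- from typing import List
--
-- def missingMultiple(nums: List[int], k: int) -> int:
--     s=set(nums)
--     i=1
--     while True:
--         if k*i not in s:
--             return k*i
--             break
--         i+=1
-- ===== SOURCE B (Python) =====
-- def missingMultiple(nums, k):
--     if k == 0:
--         return 0
--     present = sorted({n // k for n in nums if n % k == 0 and n // k >= 1})
--     expect = 1
--     for q in present:
--         if q != expect:
--             break
--         expect += 1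
--     return k * expect
-- ===== Notes on version B (the rewrite author's own statement) =====
-- stated objective: alternative
-- what changed: Replaces the probe-k*i-against-a-set loop by extracting the multiple-indices n//k present in nums, sorting them, and scanning once for the first gap starting at 1; Pre_ excludes only k=0 with 0 in nums, where A loops forever.
import Mathlib
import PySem

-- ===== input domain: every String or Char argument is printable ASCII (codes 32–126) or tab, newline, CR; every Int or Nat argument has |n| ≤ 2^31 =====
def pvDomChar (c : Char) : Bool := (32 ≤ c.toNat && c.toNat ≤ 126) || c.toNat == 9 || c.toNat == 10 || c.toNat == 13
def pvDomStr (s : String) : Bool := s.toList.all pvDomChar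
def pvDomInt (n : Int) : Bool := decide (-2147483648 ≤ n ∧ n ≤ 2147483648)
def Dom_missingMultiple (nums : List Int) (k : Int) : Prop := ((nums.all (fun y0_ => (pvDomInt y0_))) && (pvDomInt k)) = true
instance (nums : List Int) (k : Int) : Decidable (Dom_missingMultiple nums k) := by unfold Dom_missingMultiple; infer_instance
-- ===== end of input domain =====

-- B extracts the multiple-indices n//k present in nums, sorts them and scans once for
-- the first gap starting at 1, instead of probing k*i against a set in an unbounded loop.
-- Pre_ excludes only k = 0 with 0 ∈ nums, where A loops forever.

-- ===== PORT A =====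
-- the 'while True' loop; fuel nums.length+1 suffices on Pre_ (proved below); fuel-out value never reached there
def missingMultipleLoop (s : PySem.Set Int) (k : Int) : Nat → Int → Int
  | 0, i => k * i
  | f+1, i => if PySem.Set.contains s (k * i) then missingMultipleLoop s k f (i + 1) else k * i

def missingMultiple (nums : List Int) (k : Int) : Int :=
  missingMultipleLoop (PySem.Set.ofList nums) k (nums.length + 1) 1

-- ===== PORT B =====
def scanExpect : List Int → Int → Int
  | [], e => e
  | q :: rest, e => if q ≠ e then e else scanExpect rest (e + 1)

def missingMultiple_alt (nums : List Int) (k : Int) : Int :=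
  if k = 0 then 0
  else
    let present :=
      PySem.List.sorted
        (PySem.Set.ofList
          ((nums.filter (fun n => PySem.Int.mod n k == 0 && 1 ≤ PySem.Int.floordiv n k)).map
            (fun n => PySem.Int.floordiv n k)))
        (fun x => x) false
    k * scanExpect present 1

-- ===== PRECONDITION & SPEC =====
-- A diverges exactly when k = 0 and 0 ∈ nums (every probe is 0 and found); Pre_ excludes only that.
def Pre_missingMultiple (nums : List Int) (k : Int) : Prop := k ≠ 0 ∨ (0 : Int) ∉ nums
instance (nums : List Int) (k : Int) : Decidable (Pre_missingMultiple nums k) := by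
  unfold Pre_missingMultiple; infer_instance

def pvWitness_missingMultiple : List Int × Int := ([2, 4, 7], 2)

def Spec_missingMultiple (nums : List Int) (k : Int) (out : Int) : Prop := out = missingMultiple_alt nums k
instance (nums : List Int) (k : Int) (out : Int) : Decidable (Spec_missingMultiple nums k out) := by unfold Spec_missingMultiple; infer_instance

-- ===== CLAIM (what is proved, stated in full; the proofs are below) =====
def Claim_equal_missingMultiple : Prop := ∀ (nums : List Int) (k : Int), Dom_missingMultiple nums k → Pre_missingMultiple nums k → Spec_missingMultiple nums k (missingMultiple nums k)

-- ===== LEMMAS AND PROOFS =====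

-- A's loop returns k*m for the least m ≥ i with k*m ∉ s, provided m is within fuel.
lemma loop_spec (s : PySem.Set Int) (k : Int) :
    ∀ (f : Nat) (i m : Int), i ≤ m → m < i + f → (k * m) ∉ s →
      (∀ j, i ≤ j → j < m → (k * j) ∈ s) →
      missingMultipleLoop s k f i = k * m := by
  intro f
  induction f with
  | zero => intro i m h1 h2 _ _; omega
  | succ f ih =>
    intro i m h1 h2 hm hmin
    by_cases hi : m = i
    · subst hi
      simp only [missingMultipleLoop]
      rw [if_neg (by simp only [PySem.Set.contains_eq_listContains, List.contains_iff_mem]; exact hm)]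
    · have hlt : i < m := lt_of_le_of_ne h1 (fun h => hi h.symm)
      have hin : (k * i) ∈ s := hmin i le_rfl hlt
      simp only [missingMultipleLoop]
      rw [if_pos (by simp only [PySem.Set.contains_eq_listContains, List.contains_iff_mem]; exact hin)]
      exact ih (i + 1) m (by omega) (by omega) hm (fun j hj1 hj2 => hmin j (by omega) hj2)

-- pigeonhole: for k ≠ 0 some multiple k*m with 1 ≤ m ≤ |nums|+1 is missing from nums
lemma exists_missing (nums : List Int) (k : Int) (hk : k ≠ 0) :
    ∃ m : Int, 1 ≤ m ∧ m ≤ (nums.length : Int) + 1 ∧ (k * m) ∉ nums := by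
  by_contra h
  push_neg at h
  have hsub : ∀ j ∈ Finset.range (nums.length + 1), k * ((j : Int) + 1) ∈ nums.toFinset := by
    intro j hj
    rw [List.mem_toFinset]
    exact h (j + 1) (by omega) (by
      simp only [Finset.mem_range] at hj
      omega)
  have hinj : ∀ a ∈ Finset.range (nums.length + 1), ∀ b ∈ Finset.range (nums.length + 1),
      k * ((a : Int) + 1) = k * ((b : Int) + 1) → a = b := by
    intro a _ b _ hab
    have := mul_left_cancel₀ hk hab
    omega
  have hcard := Finset.card_le_card_of_injOn (fun (j : Nat) => k * ((j : Int) + 1))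
    (fun j hj => hsub j (Finset.mem_coe.mp hj))
    (fun a ha b hb hab => hinj a (Finset.mem_coe.mp ha) b (Finset.mem_coe.mp hb) hab)
  have h1 : (Finset.range (nums.length + 1)).card = nums.length + 1 := Finset.card_range _
  have h2 : nums.toFinset.card ≤ nums.length := nums.toFinset_card_le
  omega

-- scanExpect on a strictly increasing list of values ≥ e returns the least r ≥ e not in the list
lemma scanExpect_spec :
    ∀ (L : List Int) (e : Int), L.Pairwise (· < ·) → (∀ q ∈ L, e ≤ q) →
      scanExpect L e ∉ L ∧ e ≤ scanExpect L e ∧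
        ∀ j, e ≤ j → j < scanExpect L e → j ∈ L := by
  intro L
  induction L with
  | nil =>
    intro e _ _
    simp only [scanExpect]
    exact ⟨by simp, le_rfl, by intro j h1 h2; omega⟩
  | cons q rest ih =>
    intro e hp hge
    have hq : e ≤ q := hge q (List.mem_cons_self ..)
    have hrp : rest.Pairwise (· < ·) := hp.of_cons
    have hqlt : ∀ x ∈ rest, q < x := (List.pairwise_cons.mp hp).1
    by_cases hqe : q = e
    · subst hqe
      simp only [scanExpect, ne_eq, not_true_eq_false, if_false]
      have hge' : ∀ x ∈ rest, q + 1 ≤ x := fun x hx => by have := hqlt x hx; omega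
      obtain ⟨h1, h2, h3⟩ := ih (q + 1) hrp hge'
      refine ⟨?_, by omega, ?_⟩
      · intro hmem
        rcases List.mem_cons.mp hmem with h | h
        · omega
        · exact h1 h
      · intro j hj1 hj2
        by_cases hje : j = q
        · subst hje; exact List.mem_cons_self ..
        · exact List.mem_cons_of_mem _ (h3 j (by omega) hj2)
    · simp only [scanExpect, ne_eq, hqe, not_false_eq_true, if_true]
      refine ⟨?_, le_rfl, ?_⟩
      · intro hmem
        rcases List.mem_cons.mp hmem with h | h
        · exact hqe h.symm
        · have := hge _ hmem; have h2 := hqlt _ h; omega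
      · intro j h1 h2; omega

-- membership in B's sorted present list ↔ being a present multiple-index (k ≠ 0)
lemma mem_present (nums : List Int) (k : Int) (hk : k ≠ 0) (m : Int) :
    m ∈ PySem.List.sorted
        (PySem.Set.ofList
          ((nums.filter (fun n => PySem.Int.mod n k == 0 && 1 ≤ PySem.Int.floordiv n k)).map
            (fun n => PySem.Int.floordiv n k)))
        (fun x => x) false ↔ (1 ≤ m ∧ (k * m) ∈ nums) := by
  rw [PySem.List.mem_sorted, PySem.Set.mem_ofList, List.mem_map]
  constructor
  · rintro ⟨n, hn, rfl⟩
    rw [List.mem_filter] at hn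
    obtain ⟨hn1, hn2⟩ := hn
    simp only [Bool.and_eq_true, beq_iff_eq, decide_eq_true_eq] at hn2
    obtain ⟨hmod, hfd⟩ := hn2
    have hdvd : k ∣ n := (PySem.Int.mod_eq_zero_iff_dvd n k).mp hmod
    have heq : PySem.Int.floordiv n k * k + PySem.Int.mod n k = n := PySem.Int.floordiv_mul_add_mod n k
    rw [hmod, add_zero] at heq
    exact ⟨hfd, by rw [mul_comm, heq]; exact hn1⟩
  · rintro ⟨hm, hmem⟩
    refine ⟨k * m, ?_, ?_⟩
    · rw [List.mem_filter]
      refine ⟨hmem, ?_⟩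
      have hmod : PySem.Int.mod (k * m) k = 0 := (PySem.Int.mod_eq_zero_iff_dvd _ k).mpr ⟨m, rfl⟩
      have hfd : PySem.Int.floordiv (k * m) k = m := by
        have heq := PySem.Int.floordiv_mul_add_mod (k * m) k
        rw [hmod, add_zero] at heq
        have : PySem.Int.floordiv (k * m) k * k = m * k := by rw [heq]; ring
        exact mul_right_cancel₀ hk this
      simp [hmod, hfd, hm]
    · have heq := PySem.Int.floordiv_mul_add_mod (k * m) k
      rw [(PySem.Int.mod_eq_zero_iff_dvd _ k).mpr ⟨m, rfl⟩, add_zero] at heq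
      have : PySem.Int.floordiv (k * m) k * k = m * k := by rw [heq]; ring
      exact mul_right_cancel₀ hk this

-- ===== VERDICT (by name: the statement is the Claim_ definition above) =====
theorem missingMultiple_spec : Claim_equal_missingMultiple := by
  intro nums k _ hpre
  unfold Spec_missingMultiple missingMultiple missingMultiple_alt
  by_cases hk : k = 0
  · subst hk
    have h0 : (0 : Int) ∉ nums := by
      rcases hpre with h | h
      · exact absurd rfl h
      · exact h
    rw [if_pos rfl]
    have := loop_spec (PySem.Set.ofList nums) 0 (nums.length + 1) 1 1 le_rfl (by omega)
      (by rw [PySem.Set.mem_ofList]; simpa using h0) (by intro j h1 h2; omega)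
    rw [this]; ring
  · rw [if_neg hk]
    set L := PySem.List.sorted
        (PySem.Set.ofList
          ((nums.filter (fun n => PySem.Int.mod n k == 0 && 1 ≤ PySem.Int.floordiv n k)).map
            (fun n => PySem.Int.floordiv n k)))
        (fun x => x) false with hL
    have hLp : L.Pairwise (· < ·) := PySem.List.sorted_ofList_pairwise_lt _
    have hLge : ∀ q ∈ L, (1 : Int) ≤ q := fun q hq => ((mem_present nums k hk q).mp hq).1
    obtain ⟨hr1, hr2, hr3⟩ := scanExpect_spec L 1 hLp hLge
    set r := scanExpect L 1 with hr
    -- r is the least m ≥ 1 with k*m ∉ nums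
    have hrnot : (k * r) ∉ nums := fun h => hr1 ((mem_present nums k hk r).mpr ⟨hr2, h⟩)
    have hrmin : ∀ j, 1 ≤ j → j < r → (k * j) ∈ nums := by
      intro j h1 h2
      exact ((mem_present nums k hk j).mp (hr3 j h1 h2)).2
    -- r is within A's fuel: some m ≤ |nums|+1 is missing, and r is least
    obtain ⟨m, hm1, hm2, hm3⟩ := exists_missing nums k hk
    have hrle : r ≤ (nums.length : Int) + 1 := by
      by_contra hgt
      push_neg at hgt
      exact hm3 (hrmin m hm1 (by omega))
    have := loop_spec (PySem.Set.ofList nums) k (nums.length + 1) 1 r hr2 (by push_cast; omega)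
      (by rw [PySem.Set.mem_ofList]; exact hrnot)
      (by intro j h1 h2; rw [PySem.Set.mem_ofList]; exact hrmin j h1 h2)
    rw [this]
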